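-- pv_equiv track=rewrite | github.com/Hisham-Mizeed/Huffman-Hamming-AIproject | hamming.py | split_into_4bits
-- ===== SOURCE A (Python) =====
-- def split_into_4bits(binary):
--     chunks = []
--
--     for i in range(0, len(binary), 4):
--         chunk = binary[i:i+4]
--
--         if len(chunk) < 4:
--             chunk = chunk.ljust(4, '0')
--
--         chunks.append(chunk)
--
--     return chunks
-- ===== SOURCE B (Python) =====
-- def split_into_4bits(binary):
--     chunks = []
--     buf = ''
--     for ch in binary:
--         buf += ch
--         if len(buf) == 4:
--             chunks.append(buf)
--             buf = ''
--     if buf: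
--         chunks.append(buf + '0' * (4 - len(buf)))
--     return chunks
-- ===== Notes on version B (the rewrite author's own statement) =====
-- stated objective: alternative
-- what changed: B never slices by index: it streams the string character by character into a small buffer, flushing a chunk whenever the buffer reaches 4 characters, and pads and flushes the leftover buffer once at the end; A instead iterates over stride-4 start indices and slices, padding short slices in-loop.
import Mathlib
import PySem

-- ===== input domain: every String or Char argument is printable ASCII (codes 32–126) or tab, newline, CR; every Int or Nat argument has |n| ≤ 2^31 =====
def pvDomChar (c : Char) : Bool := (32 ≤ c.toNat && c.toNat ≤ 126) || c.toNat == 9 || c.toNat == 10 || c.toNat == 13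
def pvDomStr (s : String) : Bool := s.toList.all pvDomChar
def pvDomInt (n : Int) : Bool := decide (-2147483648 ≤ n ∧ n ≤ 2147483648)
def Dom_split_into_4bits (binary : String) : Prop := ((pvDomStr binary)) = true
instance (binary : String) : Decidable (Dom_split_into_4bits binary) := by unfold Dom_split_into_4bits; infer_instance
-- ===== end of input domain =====

-- B streams characters into a buffer, flushing every 4 and padding the leftover at the end, instead of A's index-stride slicing; same O(n) cost, different traversal.


-- ===== PORT A =====
-- chunk.ljust(4, '0') ported by hand: pad on the right with '0' up to length 4 (exact; only reached when length < 4)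
def split_into_4bits (binary : String) : List String :=
  (PySem.List.pyRange 0 (PySem.Str.len binary) 4).foldl
    (fun chunks i =>
      let chunk := PySem.List.slice binary.toList (some i) (some (i + 4))
      let chunk := if chunk.length < 4 then chunk ++ List.replicate (4 - chunk.length) '0' else chunk
      chunks ++ [String.ofList chunk])
    []

-- ===== PORT B =====
-- for ch in binary → foldl of the loop body (pvStepB) over binary.toList; the state is (chunks, buf);
-- '0' * (4 - len(buf)) → List.replicate; the trailing 'if buf:' is the finalizer pvFinB after the fold
def pvStepB (st : List String × List Char) (ch : Char) : List String × List Char :=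
  let buf := st.2 ++ [ch]
  if buf.length == 4 then (st.1 ++ [String.ofList buf], []) else (st.1, buf)

def pvFinB (st : List String × List Char) : List String :=
  if st.2 ≠ [] then st.1 ++ [String.ofList (st.2 ++ List.replicate (4 - st.2.length) '0')]
  else st.1

def split_into_4bits_alt (binary : String) : List String :=
  pvFinB (binary.toList.foldl pvStepB ([], []))

-- ===== PRECONDITION & SPEC =====
def Spec_split_into_4bits (binary : String) (out : List String) : Prop := out = split_into_4bits_alt binary
instance (binary : String) (out : List String) : Decidable (Spec_split_into_4bits binary out) := by unfold Spec_split_into_4bits; infer_instance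

-- ===== CLAIM (what is proved, stated in full; the proofs are below) =====
def Claim_equal_split_into_4bits : Prop := ∀ (binary : String), Dom_split_into_4bits binary → Spec_split_into_4bits binary (split_into_4bits binary)

-- ===== LEMMAS AND PROOFS =====

-- pyRange with step 4: nil and cons unfolding
theorem pvRange4_nil (a n : Int) (h : n ≤ a) : PySem.List.pyRange a n 4 = [] := by
  rw [PySem.List.pyRange_of_pos a n (by norm_num)]
  simp [if_neg (by omega : ¬ a < n)]

theorem pvRange4_cons (a n : Int) (h : a < n) :
    PySem.List.pyRange a n 4 = a :: PySem.List.pyRange (a + 4) n 4 := by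
  rw [PySem.List.pyRange_of_pos a n (by norm_num),
      PySem.List.pyRange_of_pos (a + 4) n (by norm_num)]
  by_cases h4 : a + 4 < n
  · rw [if_pos h, if_pos h4]
    have hc : ((n - a + 4 - 1) / 4).toNat = ((n - (a + 4) + 4 - 1) / 4).toNat + 1 := by omega
    rw [hc, List.range_succ_eq_map]
    simp only [List.map_cons, List.map_map]
    congr 1
    · norm_num
    · apply List.map_congr_left
      intro k _
      simp only [Function.comp]
      push_cast
      ring
  · rw [if_pos h, if_neg h4]
    have hc : ((n - a + 4 - 1) / 4).toNat = 1 := by omega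
    simp [hc, List.range_succ]

-- the common characterization: left-to-right 4-chunks, last one right-padded with '0'
def pvChunks4 : List Char → List String
  | [] => []
  | c :: t =>
      String.ofList ((c :: t).take 4 ++ List.replicate (4 - ((c :: t).take 4).length) '0')
        :: pvChunks4 ((c :: t).drop 4)
termination_by l => l.length
decreasing_by simp

theorem pvChunks4_nil : pvChunks4 [] = [] := by simp [pvChunks4]

theorem pvChunks4_cons (l : List Char) (h : l ≠ []) :
    pvChunks4 l =
      String.ofList (l.take 4 ++ List.replicate (4 - (l.take 4).length) '0') :: pvChunks4 (l.drop 4) := by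
  cases l with
  | nil => exact absurd rfl h
  | cons c t => simp [pvChunks4]

theorem pvDropNeNil (l : List Char) (a : Nat) (hal : a < l.length) : l.drop a ≠ [] := by
  intro hnil
  have := congrArg List.length hnil
  simp [List.length_drop] at this
  omega

-- A's fold over pyRange a len 4 produces pvChunks4 of the tail from a
theorem pvFoldA (l : List Char) (a : Nat) (acc : List String) :
    (PySem.List.pyRange (a : Int) (l.length : Int) 4).foldl
      (fun chunks i =>
        let chunk := PySem.List.slice l (some i) (some (i + 4))
        let chunk := if chunk.length < 4 then chunk ++ List.replicate (4 - chunk.length) '0' else chunk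
        chunks ++ [String.ofList chunk])
      acc = acc ++ pvChunks4 (l.drop a) := by
  by_cases hal : l.length ≤ a
  · rw [pvRange4_nil _ _ (by exact_mod_cast hal)]
    simp [List.drop_eq_nil_of_le hal, pvChunks4_nil]
  · rw [Nat.not_le] at hal
    rw [pvRange4_cons _ _ (by exact_mod_cast hal), List.foldl_cons]
    have h4 : ((a : Int) + 4) = ((a + 4 : Nat) : Int) := by push_cast; ring
    simp only [h4, PySem.List.slice_natCast]
    have htake : a + 4 - a = 4 := by omega
    rw [htake]
    rw [pvFoldA l (a + 4)]
    rw [pvChunks4_cons (l.drop a) (pvDropNeNil l a hal)]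
    rw [List.drop_drop]
    have hch : (if (List.take 4 (List.drop a l)).length < 4 then
          List.take 4 (List.drop a l) ++ List.replicate (4 - (List.take 4 (List.drop a l)).length) '0'
        else List.take 4 (List.drop a l))
        = List.take 4 (List.drop a l) ++ List.replicate (4 - (List.take 4 (List.drop a l)).length) '0' := by
      by_cases hlt : (List.take 4 (List.drop a l)).length < 4
      · rw [if_pos hlt]
      · rw [if_neg hlt]
        have h0 : 4 - (List.take 4 (List.drop a l)).length = 0 := by omega
        rw [h0, List.replicate_zero, List.append_nil]
    rw [hch, List.append_assoc, List.singleton_append]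
termination_by l.length - a
decreasing_by omega

-- B's streaming fold + finalizer produce pvChunks4 of (buf ++ remaining input)
theorem pvFoldB (l : List Char) (buf : List Char) (chunks : List String) (hb : buf.length < 4) :
    pvFinB (l.foldl pvStepB (chunks, buf)) = chunks ++ pvChunks4 (buf ++ l) := by
  induction l generalizing buf chunks with
  | nil =>
    simp only [List.foldl_nil, List.append_nil, pvFinB]
    by_cases h0 : buf = []
    · subst h0; simp [pvChunks4_nil]
    · rw [if_pos h0]
      rw [pvChunks4_cons buf h0]
      have ht : buf.take 4 = buf := List.take_of_length_le (by omega)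
      have hd : buf.drop 4 = [] := List.drop_eq_nil_of_le (by omega)
      rw [ht, hd, pvChunks4_nil]
  | cons c t ih =>
    rw [List.foldl_cons]
    by_cases h4 : (buf ++ [c]).length = 4
    · have hstep : pvStepB (chunks, buf) c = (chunks ++ [String.ofList (buf ++ [c])], []) := by
        simp only [pvStepB, beq_iff_eq]
        rw [if_pos h4]
      rw [hstep, ih [] (chunks ++ [String.ofList (buf ++ [c])]) (by norm_num)]
      have hbc : buf ++ c :: t = (buf ++ [c]) ++ t := by simp
      rw [hbc]
      rw [pvChunks4_cons ((buf ++ [c]) ++ t) (by simp)]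
      have ht : ((buf ++ [c]) ++ t).take 4 = buf ++ [c] := by
        rw [List.take_append_of_le_length (by omega), List.take_of_length_le (by omega)]
      have hd : ((buf ++ [c]) ++ t).drop 4 = t := by
        rw [List.drop_append_of_le_length (by omega), List.drop_eq_nil_of_le (by omega),
          List.nil_append]
      rw [ht, hd, h4]
      simp
    · have hstep : pvStepB (chunks, buf) c = (chunks, buf ++ [c]) := by
        simp only [pvStepB, beq_iff_eq]
        rw [if_neg h4]
      rw [hstep, ih (buf ++ [c]) chunks (by simp at h4 ⊢; omega)]
      simp

-- ===== VERDICT (by name: the statement is the Claim_ definition above) =====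
theorem split_into_4bits_spec : Claim_equal_split_into_4bits := by
  intro binary _
  unfold Spec_split_into_4bits
  have hlen : PySem.Str.len binary = ((binary.toList.length : Nat) : Int) := by
    rw [PySem.Str.len_eq, String.length_toList]
  simp only [split_into_4bits, split_into_4bits_alt, hlen]
  have hA := pvFoldA binary.toList 0 []
  simp only [Nat.cast_zero, List.drop_zero, List.nil_append] at hA
  have hB := pvFoldB binary.toList [] [] (by norm_num)
  simp only [List.nil_append] at hB
  rw [hA]
  exact hB.symm
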